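-- pv_equiv track=rewrite | github.com/AronBakes/navbuddy | navbuddy/eval/metrics_semantic.py | _same_direction_family
-- ===== SOURCE A (Python) =====
-- def _same_direction_family(a: str, b: str) -> bool:
--     left = {"turn_left", "merge_left", "fork_left", "keep_left", "ramp_left"}
--     right = {"turn_right", "merge_right", "fork_right", "keep_right", "ramp_right"}
--     straight = {"continue", "straight", "merge"}
--     roundabout = {"roundabout", "roundabout_left", "roundabout_right"}
--     for family in (left, right, straight, roundabout):
--         if a in family and b in family:
--             return True
--     return False
-- ===== SOURCE B (Python) =====
-- _HEADS = ("turn", "merge", "fork", "keep", "ramp")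
--
--
-- def _family(m: str):
--     # Derive the family from the string's structure instead of scanning sets:
--     # roundabout* and the three straight words are fixed; otherwise a sided
--     # maneuver is 'head_side' where head is a known verb and side names the family.
--     if m in ("roundabout", "roundabout_left", "roundabout_right"):
--         return "roundabout"
--     if m in ("continue", "straight", "merge"):
--         return "straight"
--     head, sep, side = m.partition("_")
--     if sep and head in _HEADS and side in ("left", "right"):
--         return side
--     return None
--
--
-- def _same_direction_family(a: str, b: str) -> bool:
--     fa = _family(a)
--     return fa is not None and fa == _family(b)
-- ===== Notes on version B (the rewrite author's own statement) =====
-- stated objective: alternative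
-- what changed: Instead of scanning four literal sets for joint membership, B computes each maneuver's family by parsing the string: roundabout* and the three straight words are matched directly, and any other maneuver is split at its first '_' into a known verb head and a side ('left'/'right') that itself names the family; the call then compares the two derived labels with a None guard.
import Mathlib
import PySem

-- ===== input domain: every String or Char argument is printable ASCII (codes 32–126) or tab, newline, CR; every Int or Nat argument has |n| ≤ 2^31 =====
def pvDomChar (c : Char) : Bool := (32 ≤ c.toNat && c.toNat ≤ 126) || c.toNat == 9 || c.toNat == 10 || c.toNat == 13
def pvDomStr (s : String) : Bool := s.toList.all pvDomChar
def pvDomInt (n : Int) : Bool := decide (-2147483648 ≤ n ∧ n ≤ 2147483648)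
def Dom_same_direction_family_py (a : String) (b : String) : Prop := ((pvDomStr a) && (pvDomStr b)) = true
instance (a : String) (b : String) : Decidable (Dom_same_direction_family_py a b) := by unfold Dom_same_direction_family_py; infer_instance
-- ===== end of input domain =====

-- B derives the family from the string's structure (partition at the first '_'
-- into a known verb and a side) instead of scanning four literal sets (alternative; same behaviour).

-- ===== PORT A =====
def pvLeft : PySem.Set String :=
  PySem.Set.ofList ["turn_left", "merge_left", "fork_left", "keep_left", "ramp_left"]
def pvRight : PySem.Set String :=
  PySem.Set.ofList ["turn_right", "merge_right", "fork_right", "keep_right", "ramp_right"]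
def pvStraight : PySem.Set String := PySem.Set.ofList ["continue", "straight", "merge"]
def pvRoundabout : PySem.Set String :=
  PySem.Set.ofList ["roundabout", "roundabout_left", "roundabout_right"]

-- the for-loop with early 'return True' over the 4-tuple of families
def same_direction_family_py (a : String) (b : String) : Bool :=
  [pvLeft, pvRight, pvStraight, pvRoundabout].any
    (fun family => PySem.Set.contains family a && PySem.Set.contains family b)

-- ===== PORT B =====
-- str.partition('_') on the character list: (before, found?, after) at the FIRST '_' (exact)
def pvPartitionChars : List Char → List Char × Bool × List Char
  | [] => ([], false, [])
  | c :: rest =>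
      if c = '_' then ([], true, rest)
      else
        let (p, f, s) := pvPartitionChars rest
        (c :: p, f, s)

def pvHeads : List String := ["turn", "merge", "fork", "keep", "ramp"]

-- Source B's _family helper
def pvFamilyOf (m : String) : Option String :=
  if m = "roundabout" ∨ m = "roundabout_left" ∨ m = "roundabout_right" then
    some "roundabout"
  else if m = "continue" ∨ m = "straight" ∨ m = "merge" then
    some "straight"
  else
    match pvPartitionChars m.toList with
    | (p, f, s) =>
        if f = true ∧ String.ofList p ∈ pvHeads ∧ (String.ofList s = "left" ∨ String.ofList s = "right")
        then some (String.ofList s) else none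

def same_direction_family_py_alt (a : String) (b : String) : Bool :=
  match pvFamilyOf a with
  | none => false
  | some fa => pvFamilyOf b == some fa

-- ===== PRECONDITION & SPEC =====
def Spec_same_direction_family_py (a : String) (b : String) (out : Bool) : Prop := out = same_direction_family_py_alt a b
instance (a : String) (b : String) (out : Bool) : Decidable (Spec_same_direction_family_py a b out) := by unfold Spec_same_direction_family_py; infer_instance

-- ===== CLAIM (what is proved, stated in full; the proofs are below) =====
def Claim_equal_same_direction_family_py : Prop := ∀ (a : String) (b : String), Dom_same_direction_family_py a b → Spec_same_direction_family_py a b (same_direction_family_py a b)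

-- ===== LEMMAS AND PROOFS =====

-- when partition finds '_', the input is before ++ '_' :: after
theorem pvPartitionChars_reconstruct :
    ∀ (l p s : List Char), pvPartitionChars l = (p, true, s) → l = p ++ '_' :: s := by
  intro l
  induction l with
  | nil => intro p s h; simp [pvPartitionChars] at h
  | cons c rest ih =>
    intro p s h
    by_cases hc : c = '_'
    · simp [pvPartitionChars, hc] at h
      simp [hc, h.1.symm, h.2.symm]
    · simp only [pvPartitionChars, if_neg hc] at h
      obtain ⟨p', f', s', hrec⟩ : ∃ p' f' s', pvPartitionChars rest = (p', f', s') :=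
        ⟨_, _, _, rfl⟩
      rw [hrec] at h
      simp only [Prod.mk.injEq] at h
      obtain ⟨hp, hf, hs⟩ := h
      subst hf
      rw [← hp, ← hs, List.cons_append]
      exact congrArg (c :: ·) (ih p' s' hrec)

theorem mem_of_toList_mem (x : String) (L : List String)
    (h : x.toList ∈ L.map String.toList) : x ∈ L := by
  rcases List.mem_map.mp h with ⟨y, hy, he⟩
  exact String.toList_inj.mp he ▸ hy

-- whenever _family yields a label, the label names the family the input belongs to
theorem pvFamilyOf_some (m lbl : String) (h : pvFamilyOf m = some lbl) :
    (lbl = "left" ∧ m ∈ ["turn_left", "merge_left", "fork_left", "keep_left", "ramp_left"]) ∨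
    (lbl = "right" ∧ m ∈ ["turn_right", "merge_right", "fork_right", "keep_right", "ramp_right"]) ∨
    (lbl = "straight" ∧ m ∈ ["continue", "straight", "merge"]) ∨
    (lbl = "roundabout" ∧ m ∈ ["roundabout", "roundabout_left", "roundabout_right"]) := by
  unfold pvFamilyOf at h
  split_ifs at h with h1 h2
  · obtain rfl : lbl = "roundabout" := by simpa using h.symm
    refine Or.inr (Or.inr (Or.inr ⟨rfl, ?_⟩))
    simpa using h1
  · obtain rfl : lbl = "straight" := by simpa using h.symm
    refine Or.inr (Or.inr (Or.inl ⟨rfl, ?_⟩))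
    simpa using h2
  · obtain ⟨p, f, s, hpart⟩ : ∃ p f s, pvPartitionChars m.toList = (p, f, s) := ⟨_, _, _, rfl⟩
    rw [hpart] at h
    dsimp only at h
    split_ifs at h with hc
    · obtain ⟨hf, hhead, hside⟩ := hc
      subst hf
      obtain rfl : lbl = String.ofList s := by simpa using h.symm
      have hm : m.toList = p ++ '_' :: s := pvPartitionChars_reconstruct _ _ _ hpart
      have hp : p = "turn".toList ∨ p = "merge".toList ∨ p = "fork".toList ∨
          p = "keep".toList ∨ p = "ramp".toList := by
        simp only [pvHeads, List.mem_cons, List.not_mem_nil, or_false] at hhead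
        rcases hhead with h' | h' | h' | h' | h' <;>
          simp [← h']
      have hs : s = "left".toList ∨ s = "right".toList := by
        rcases hside with h' | h' <;> simp [← h']
      rcases hp with rfl | rfl | rfl | rfl | rfl <;> rcases hs with rfl | rfl <;>
        first
          | exact Or.inl ⟨by decide, mem_of_toList_mem m _ (by rw [hm]; decide)⟩
          | exact Or.inr (Or.inl ⟨by decide, mem_of_toList_mem m _ (by rw [hm]; decide)⟩)

-- each of A's membership tests equals a label comparison on B's _family
theorem contains_left_eq (a : String) :
    PySem.Set.contains pvLeft a = (pvFamilyOf a == some "left") := by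
  rw [Bool.eq_iff_iff]
  simp only [PySem.Set.contains, List.contains_iff_mem, beq_iff_eq]
  constructor
  · intro h
    rcases (by simpa [pvLeft, PySem.Set.ofList] using h :
        a = "turn_left" ∨ a = "merge_left" ∨ a = "fork_left" ∨ a = "keep_left" ∨
        a = "ramp_left") with rfl | rfl | rfl | rfl | rfl <;> decide
  · intro h
    rcases pvFamilyOf_some a _ h with ⟨_, hm⟩ | ⟨hl, _⟩ | ⟨hl, _⟩ | ⟨hl, _⟩
    · simpa [pvLeft, PySem.Set.ofList] using hm
    all_goals exact absurd hl (by decide)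

theorem contains_right_eq (a : String) :
    PySem.Set.contains pvRight a = (pvFamilyOf a == some "right") := by
  rw [Bool.eq_iff_iff]
  simp only [PySem.Set.contains, List.contains_iff_mem, beq_iff_eq]
  constructor
  · intro h
    rcases (by simpa [pvRight, PySem.Set.ofList] using h :
        a = "turn_right" ∨ a = "merge_right" ∨ a = "fork_right" ∨ a = "keep_right" ∨
        a = "ramp_right") with rfl | rfl | rfl | rfl | rfl <;> decide
  · intro h
    rcases pvFamilyOf_some a _ h with ⟨hl, _⟩ | ⟨_, hm⟩ | ⟨hl, _⟩ | ⟨hl, _⟩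
    · exact absurd hl (by decide)
    · simpa [pvRight, PySem.Set.ofList] using hm
    all_goals exact absurd hl (by decide)

theorem contains_straight_eq (a : String) :
    PySem.Set.contains pvStraight a = (pvFamilyOf a == some "straight") := by
  rw [Bool.eq_iff_iff]
  simp only [PySem.Set.contains, List.contains_iff_mem, beq_iff_eq]
  constructor
  · intro h
    rcases (by simpa [pvStraight, PySem.Set.ofList] using h :
        a = "continue" ∨ a = "straight" ∨ a = "merge") with rfl | rfl | rfl <;> decide
  · intro h
    rcases pvFamilyOf_some a _ h with ⟨hl, _⟩ | ⟨hl, _⟩ | ⟨_, hm⟩ | ⟨hl, _⟩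
    · exact absurd hl (by decide)
    · exact absurd hl (by decide)
    · simpa [pvStraight, PySem.Set.ofList] using hm
    · exact absurd hl (by decide)

theorem contains_roundabout_eq (a : String) :
    PySem.Set.contains pvRoundabout a = (pvFamilyOf a == some "roundabout") := by
  rw [Bool.eq_iff_iff]
  simp only [PySem.Set.contains, List.contains_iff_mem, beq_iff_eq]
  constructor
  · intro h
    rcases (by simpa [pvRoundabout, PySem.Set.ofList] using h :
        a = "roundabout" ∨ a = "roundabout_left" ∨ a = "roundabout_right") with
      rfl | rfl | rfl <;> decide
  · intro h
    rcases pvFamilyOf_some a _ h with ⟨hl, _⟩ | ⟨hl, _⟩ | ⟨hl, _⟩ | ⟨_, hm⟩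
    · exact absurd hl (by decide)
    · exact absurd hl (by decide)
    · exact absurd hl (by decide)
    · simpa [pvRoundabout, PySem.Set.ofList] using hm

-- ===== VERDICT (by name: the statement is the Claim_ definition above) =====
theorem same_direction_family_py_spec : Claim_equal_same_direction_family_py := by
  intro a b _
  unfold Spec_same_direction_family_py
  simp only [same_direction_family_py, same_direction_family_py_alt, List.any_cons,
    List.any_nil, Bool.or_false, contains_left_eq, contains_right_eq, contains_straight_eq,
    contains_roundabout_eq]
  cases hga : pvFamilyOf a with
  | none => simp
  | some fa =>
    have : fa = "left" ∨ fa = "right" ∨ fa = "straight" ∨ fa = "roundabout" := by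
      rcases pvFamilyOf_some a fa hga with ⟨h, _⟩ | ⟨h, _⟩ | ⟨h, _⟩ | ⟨h, _⟩ <;> tauto
    rcases this with rfl | rfl | rfl | rfl <;> simp
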